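-- pv_equiv track=rewrite | github.com/grushnik/PitchDecker | app.py | wrap_by_wordcount
-- ===== SOURCE A (Python) =====
-- def wrap_by_wordcount(text: str, max_words: int) -> list[str]:
--     """Wrap text so each line has at most max_words (don’t split words)."""
--     words = (text or "").split()
--     if not words:
--         return [""]
--     lines, bucket = [], []
--     for w in words:
--         if len(bucket) < max_words:
--             bucket.append(w)
--         else:
--             lines.append(" ".join(bucket))
--             bucket = [w]
--     if bucket:
--         lines.append(" ".join(bucket))
--     return lines
-- ===== SOURCE B (Python) =====
-- def wrap_by_wordcount(text: str, max_words: int) -> list[str]: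
--     """Wrap text so each line has at most max_words (don't split words)."""
--     words = (text or "").split()
--     if not words:
--         return [""]
--     return [" ".join(words[i:i + max_words])
--             for i in range(0, len(words), max_words)]
-- ===== Notes on version B (the rewrite author's own statement) =====
-- stated objective: simpler
-- what changed: Replaces the word-by-word bucket-accumulation loop (with its flush branch and trailing-bucket fixup) by a single index-stride comprehension that slices the word list into chunks of max_words and joins each chunk.
-- outside the precondition, e.g. on wrap_by_wordcount('a b', 0): A returns ['', 'a', 'b'], B raises ValueError; on wrap_by_wordcount('a b', -1): A returns ['', 'a', 'b'], B returns []
import Mathlib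
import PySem

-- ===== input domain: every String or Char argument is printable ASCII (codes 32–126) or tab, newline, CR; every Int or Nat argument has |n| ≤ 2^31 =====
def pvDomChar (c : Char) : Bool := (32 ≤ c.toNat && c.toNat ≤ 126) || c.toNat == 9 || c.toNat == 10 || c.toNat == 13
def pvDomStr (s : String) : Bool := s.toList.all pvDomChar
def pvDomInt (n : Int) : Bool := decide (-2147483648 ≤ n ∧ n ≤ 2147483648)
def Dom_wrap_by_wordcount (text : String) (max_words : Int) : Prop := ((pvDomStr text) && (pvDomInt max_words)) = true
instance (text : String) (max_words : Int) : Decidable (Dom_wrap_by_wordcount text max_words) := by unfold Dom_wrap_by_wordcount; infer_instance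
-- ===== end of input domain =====

-- B replaces A's word-by-word bucket-accumulation loop by a stride/slice comprehension over word indices (objective: simpler).


-- ===== PORT A =====
-- '(text or "")' is 'text' itself (an empty string is falsy and replaced by ""), so it is ported as 'text'.
def wrap_by_wordcount (text : String) (max_words : Int) : List String :=
  let words := PySem.Str.split₀ text
  if words = [] then [""]
  else
    let st := words.foldl
      (fun (st : List String × List String) w =>
        if (st.2.length : Int) < max_words then (st.1, st.2 ++ [w])
        else (st.1 ++ [PySem.Str.join " " st.2], [w])) ([], [])
    if st.2 ≠ [] then st.1 ++ [PySem.Str.join " " st.2] else st.1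

-- ===== PORT B =====
def wrap_by_wordcount_alt (text : String) (max_words : Int) : List String :=
  let words := PySem.Str.split₀ text
  if words = [] then [""]
  else (PySem.List.pyRange 0 (words.length : Int) max_words).map
    (fun i => PySem.Str.join " " (PySem.List.slice words (some i) (some (i + max_words))))

-- ===== PRECONDITION & SPEC =====
-- Pre_ restricts to the natural domain max_words ≥ 1 (plus texts with no words, where max_words is never
-- consulted): for max_words ≤ 0 on a text with words, A's returned value (a spurious empty first line
-- followed by one word per line) is an accident of its bucket loop, and B does not return it
-- (B raises ValueError at max_words = 0 and yields [] for negative max_words).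
def Pre_wrap_by_wordcount (text : String) (max_words : Int) : Prop := 1 ≤ max_words ∨ PySem.Str.split₀ text = []
instance (text_ : String) (max_words : Int) : Decidable (Pre_wrap_by_wordcount text_ max_words) := by unfold Pre_wrap_by_wordcount; infer_instance
def pvWitness_wrap_by_wordcount : String × Int := ("hello wrapped world", 2)

def Spec_wrap_by_wordcount (text : String) (max_words : Int) (out : List String) : Prop := out = wrap_by_wordcount_alt text max_words
instance (text : String) (max_words : Int) (out : List String) : Decidable (Spec_wrap_by_wordcount text max_words out) := by unfold Spec_wrap_by_wordcount; infer_instance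

-- ===== CLAIM (what is proved, stated in full; the proofs are below) =====
def Claim_equal_wrap_by_wordcount : Prop := ∀ (text : String) (max_words : Int), Dom_wrap_by_wordcount text max_words → Pre_wrap_by_wordcount text max_words → Spec_wrap_by_wordcount text max_words (wrap_by_wordcount text max_words)

-- ===== LEMMAS AND PROOFS =====

-- the common chunk decomposition both ports are reduced to (fuel ≥ ws.length makes it total)
def pvChunks (m : Int) : Nat → List String → List (List String)
  | _, [] => []
  | 0, _ :: _ => []
  | f + 1, w :: ws => ((w :: ws).take m.toNat) :: pvChunks m f ((w :: ws).drop m.toNat)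

theorem pvChunks_nil (m : Int) (f : Nat) : pvChunks m f [] = [] := by
  cases f <;> rfl

theorem pvChunks_cons (m : Int) (f : Nat) (l : List String) (hl : l ≠ []) :
    pvChunks m (f + 1) l = l.take m.toNat :: pvChunks m f (l.drop m.toNat) := by
  cases l with
  | nil => exact absurd rfl hl
  | cons a l => rfl

theorem pyRange_pos_nil (a b m : Int) (hm : 1 ≤ m) (h : b ≤ a) :
    PySem.List.pyRange a b m = [] := by
  simp [PySem.List.pyRange]
  intro _; split_ifs <;> omega

theorem pyRange_pos_cons (a b m : Int) (hm : 1 ≤ m) (h : a < b) :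
    PySem.List.pyRange a b m = a :: PySem.List.pyRange (a + m) b m := by
  have hm0 : m ≠ 0 := by omega
  have key : (b - a + m - 1) / m = (b - a - 1) / m + 1 := by
    have e : b - a + m - 1 = (b - a - 1) + 1 * m := by ring
    rw [e, Int.add_mul_ediv_right _ _ hm0]
  have hq : 0 ≤ (b - a - 1) / m := Int.ediv_nonneg (by omega) (by omega)
  simp only [PySem.List.pyRange, if_neg hm0, if_pos (by omega : (0:Int) < m), if_pos h]
  have e2 : b - (a + m) + m - 1 = b - a - 1 := by ring
  rw [e2]
  have hcount : ((b - a + m - 1) / m).toNat = ((b - a - 1) / m).toNat + 1 := by omega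
  rw [hcount, List.range_succ_eq_map, List.map_cons, List.map_map]
  have hfun : ((fun k : Nat => a + m * (k : Int)) ∘ Nat.succ) = fun k : Nat => (a + m) + m * (k : Int) := by
    funext k
    simp only [Function.comp, Nat.succ_eq_add_one]
    push_cast
    ring
  rw [hfun]
  by_cases h2 : a + m < b
  · rw [if_pos h2]
    simp
  · have hz : (b - a - 1) / m = 0 := Int.ediv_eq_zero_of_lt (by omega) (by omega)
    rw [if_neg h2, hz]
    simp

theorem pyRange_pos_nonneg (b m i : Int) (hm : 1 ≤ m) (hi : i ∈ PySem.List.pyRange 0 b m) :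
    0 ≤ i := by
  simp only [PySem.List.pyRange] at hi
  split_ifs at hi
  all_goals try exact absurd hi (List.not_mem_nil)
  all_goals
    obtain ⟨k, -, rfl⟩ := List.mem_map.mp hi
    have : (0:Int) ≤ m * (k : Int) := mul_nonneg (by omega) (Int.natCast_nonneg k)
    omega

theorem pyRange_shift (a b m : Int) :
    PySem.List.pyRange a b m = (PySem.List.pyRange 0 (b - a) m).map (fun i => a + i) := by
  simp only [PySem.List.pyRange, zero_sub, sub_zero, zero_add, neg_sub]
  split_ifs <;> first
    | rfl
    | omega
    | (simp only [List.map_map]; rfl)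

-- B's stride map equals the chunk decomposition
theorem B_aux (m : Int) (hm : 1 ≤ m) :
    ∀ (f : Nat) (ws : List String), ws.length ≤ f →
    (PySem.List.pyRange 0 (ws.length : Int) m).map
      (fun i => PySem.Str.join " " (PySem.List.slice ws (some i) (some (i + m))))
    = (pvChunks m f ws).map (PySem.Str.join " ") := by
  intro f
  induction f with
  | zero =>
    intro ws hf
    have hws : ws = [] := List.length_eq_zero_iff.mp (Nat.le_zero.mp hf)
    subst hws
    simp [pyRange_pos_nil 0 0 m hm le_rfl, pvChunks_nil]
  | succ f ih =>
    intro ws hf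
    cases ws with
    | nil => simp [pyRange_pos_nil 0 0 m hm le_rfl, pvChunks_nil]
    | cons w ws' =>
      have hlen : (0:Int) < ((w :: ws').length : Int) := by
        simp only [List.length_cons]
        omega
      rw [pyRange_pos_cons 0 _ m hm hlen, List.map_cons,
          pvChunks_cons m f _ (List.cons_ne_nil w ws'), List.map_cons]
      have hhead : PySem.List.slice (w :: ws') (some 0) (some (0 + m)) = (w :: ws').take m.toNat := by
        rw [PySem.List.slice_toNat _ le_rfl (by omega)]
        simp
      rw [hhead]
      refine congrArg _ ?_
      rw [pyRange_shift (0 + m) _ m, List.map_map]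
      by_cases hml : m ≤ ((w :: ws').length : Int)
      · have hlen'' : (((w :: ws').drop m.toNat).length : Int) = ((w :: ws').length : Int) - (0 + m) := by
          rw [List.length_drop]
          omega
        rw [← hlen'']
        have hmt : 1 ≤ m.toNat := by omega
        have hle : ((w :: ws').drop m.toNat).length ≤ f := by
          simp only [List.length_drop, List.length_cons] at hf ⊢
          omega
        rw [← ih _ hle]
        apply List.map_congr_left
        intro i hi
        have h0i : 0 ≤ i := pyRange_pos_nonneg _ m i hm hi
        simp only [Function.comp]
        refine congrArg _ ?_
        rw [PySem.List.slice_toNat _ (by omega) (by omega),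
            PySem.List.slice_toNat _ (by omega) (by omega), List.drop_drop]
        have e1 : (0 + m + i).toNat = i.toNat + m.toNat := by omega
        rw [e1]
        have e2 : (0 + m + i + m).toNat - (i.toNat + m.toNat) = (i + m).toNat - i.toNat := by omega
        have e3 : i.toNat + m.toNat = m.toNat + i.toNat := by omega
        rw [e2, e3]
      · have h1 : PySem.List.pyRange 0 (((w :: ws').length : Int) - (0 + m)) m = [] :=
          pyRange_pos_nil _ _ m hm (by omega)
        have h2 : (w :: ws').drop m.toNat = [] := by
          apply List.drop_eq_nil_of_le
          simp only [List.length_cons] at hml ⊢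
          omega
        rw [h1, h2, pvChunks_nil]
        simp

-- A's bucket loop equals the chunk decomposition
theorem A_aux (m : Int) (hm : 1 ≤ m) :
    ∀ (ws : List String) (f : Nat) (lines bucket : List String),
    bucket ≠ [] → (bucket.length : Int) ≤ m → bucket.length + ws.length ≤ f →
    (let st := ws.foldl
        (fun (st : List String × List String) w =>
          if (st.2.length : Int) < m then (st.1, st.2 ++ [w])
          else (st.1 ++ [PySem.Str.join " " st.2], [w])) (lines, bucket)
     if st.2 ≠ [] then st.1 ++ [PySem.Str.join " " st.2] else st.1)
    = lines ++ (pvChunks m f (bucket ++ ws)).map (PySem.Str.join " ") := by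
  intro ws
  induction ws with
  | nil =>
    intro f lines bucket hb hbm hf
    have hb1 : 1 ≤ bucket.length := List.length_pos_iff.mpr hb
    obtain ⟨f', rfl⟩ : ∃ f', f = f' + 1 := ⟨f - 1, by omega⟩
    simp only [List.foldl_nil, List.append_nil]
    rw [pvChunks_cons m f' bucket hb]
    have htake : bucket.take m.toNat = bucket := List.take_of_length_le (by omega)
    have hdrop : bucket.drop m.toNat = [] := List.drop_eq_nil_of_le (by omega)
    rw [htake, hdrop, pvChunks_nil]
    simp [hb]
  | cons w ws' ih =>
    intro f lines bucket hb hbm hf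
    simp only [List.foldl_cons]
    by_cases hlt : (bucket.length : Int) < m
    · rw [if_pos hlt]
      have := ih f lines (bucket ++ [w]) (by simp) (by simp; omega) (by simp at hf ⊢; omega)
      simp only at this
      rw [this, List.append_assoc]
      simp
    · have heq : (bucket.length : Int) = m := le_antisymm hbm (not_lt.mp hlt)
      rw [if_neg hlt]
      have hb1 : 1 ≤ bucket.length := List.length_pos_iff.mpr hb
      obtain ⟨f', rfl⟩ : ∃ f', f = f' + 1 := ⟨f - 1, by omega⟩
      have hrec := ih f' (lines ++ [PySem.Str.join " " bucket]) [w] (by simp) (by simp; omega)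
        (by simp at hf ⊢; omega)
      simp only at hrec
      rw [hrec]
      rw [pvChunks_cons m f' _ (by simp [hb])]
      have hmn : bucket.length = m.toNat := by omega
      rw [List.take_left' hmn, List.drop_left' hmn]
      simp

-- ===== VERDICT (by name: the statement is the Claim_ definition above) =====
theorem wrap_by_wordcount_spec : Claim_equal_wrap_by_wordcount := by
  intro text m _ hpre
  unfold Pre_wrap_by_wordcount at hpre
  unfold Spec_wrap_by_wordcount wrap_by_wordcount wrap_by_wordcount_alt
  cases hws : PySem.Str.split₀ text with
  | nil => simp
  | cons w rest =>
    have hm : 1 ≤ m := by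
      rcases hpre with hm | hnil
      · exact hm
      · rw [hws] at hnil; exact absurd hnil (List.cons_ne_nil w rest)
    simp only [reduceCtorEq]
    rw [List.foldl_cons]
    rw [if_pos (by simp; omega : ((([] : List String)).length : Int) < m)]
    simp only [List.nil_append]
    have hA := A_aux m hm rest (rest.length + 1) [] [w] (by simp) (by simp; omega) (by simp; omega)
    simp only at hA
    rw [hA]
    have hB := B_aux m hm (rest.length + 1) (w :: rest) (by simp)
    rw [hB]
    simp
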